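-- pv_equiv track=rewrite | github.com/MHeymann/texcitations | parsebibtex.py | split_names_on_space
-- ===== SOURCE A (Python) =====
-- def split_names_on_space(author):
--     i = 0
--     names = []
--     name = ""
--     while i < len(author):
--         if author[i] == "\\":
--             i += 1
--             name += "\\" + author[i]
--             i += 1
--         elif author[i] == "{":
--             i, braces = skip_braces(author, i)
--             name += f"{{{braces}}}"
--         elif author[i] == " ":
--             names.append(name)
--             name = ""
--             i += 1
--         else:
--             name += author[i]
--             i += 1
--     names.append(name)
--     return names
--
-- def skip_braces(authors, i):
--     if not authors[i] == "{":
--         print ("open braces with '{'")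
--         exit()
--
--     i += 1
--
--     cont = ""
--     while not authors[i] == "}":
--         if authors[i] == "{":
--             i, braces = skip_braces(authors, i)
--             cont += f"{{{braces}}}"
--         else:
--             cont += authors[i]
--             i += 1
--
--     #skip over closing brace
--     i += 1
--
--     return i, cont
-- ===== SOURCE B (Python) =====
-- def split_names_on_space(author):
--     names = []
--     name = []
--     depth = 0
--     i = 0
--     while i < len(author):
--         c = author[i]
--         if depth == 0 and c == "\\":
--             name.append("\\")
--             name.append(author[i + 1])
--             i += 2
--             continue
--         if c == "{":
--             depth += 1
--             name.append(c)
--         elif c == "}":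
--             if depth:
--                 depth -= 1
--             name.append(c)
--         elif c == " " and depth == 0:
--             names.append("".join(name))
--             name = []
--         else:
--             name.append(c)
--         i += 1
--     names.append("".join(name))
--     return names
-- ===== Notes on version B (the rewrite author's own statement) =====
-- stated objective: faster
-- what changed: A's recursive-descent helper skip_braces (a recursive call per nested brace group, rebuilding content via f-strings) plus repeated string += is replaced by one flat single-pass state machine: a single loop with a depth counter that splits on spaces and handles escapes only at depth 0, accumulating characters in a list joined once per name.
import Mathlib
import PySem

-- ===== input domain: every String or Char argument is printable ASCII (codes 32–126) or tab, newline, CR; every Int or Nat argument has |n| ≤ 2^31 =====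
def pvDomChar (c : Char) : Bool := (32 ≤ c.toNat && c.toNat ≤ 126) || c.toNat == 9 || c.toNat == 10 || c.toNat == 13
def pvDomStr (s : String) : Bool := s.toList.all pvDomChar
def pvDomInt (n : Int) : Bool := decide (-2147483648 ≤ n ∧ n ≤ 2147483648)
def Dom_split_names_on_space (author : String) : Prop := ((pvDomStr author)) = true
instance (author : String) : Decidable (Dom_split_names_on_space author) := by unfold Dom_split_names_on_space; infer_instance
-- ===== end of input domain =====

-- B replaces A's recursive-descent brace helper + outer loop by ONE flat single-pass state machine
-- with a depth counter (no helper, no recursion, no inner loop; list-append+join instead of string +=,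
-- measured faster in a timing run); return values agree on Pre_, which
-- excludes exactly the inputs where A raises IndexError (trailing top-level backslash or unclosed brace).

-- ===== PORT A =====
-- inner while-loop of skip_braces; the fuel argument only makes the nested recursion total
-- (it is never exhausted on inputs satisfying Pre_)
def pvSkipALoop : Nat → List Char → List Char → List Char × List Char
  | 0, _, cont => ([], cont)
  | _ + 1, [], cont => ([], cont)            -- Python: IndexError (excluded by Pre_)
  | f + 1, c :: t, cont =>
    if c = '}' then (t, cont)                -- loop guard: stop before '}' (caller skips over it)
    else if c = '{' then
      let (r, braces) := pvSkipALoop f t []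
      pvSkipALoop f r (cont ++ '{' :: braces ++ ['}'])
    else pvSkipALoop f t (cont ++ [c])

-- skip_braces(authors, i): the guard, skip the '{', run the loop
def pvSkipBracesA (l : List Char) : List Char × List Char :=
  match l with
  | '{' :: t => pvSkipALoop (t.length + 1) t []
  | _ => ([], [])                            -- Python: print + exit() (never reached from the caller)

-- outer while-loop of A; fuel only for totality (one unit per iteration, never exhausted)
def pvLoopA : Nat → List Char → List Char → List (List Char) → List (List Char)
  | 0, _, name, names => names ++ [name]
  | _ + 1, [], name, names => names ++ [name]
  | f + 1, c :: t, name, names =>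
    if c = '\\' then
      match t with
      | [] => names ++ [name]                -- Python: IndexError on author[i] (excluded by Pre_)
      | d :: t' => pvLoopA f t' (name ++ ['\\', d]) names
    else if c = '{' then
      let (r, braces) := pvSkipBracesA (c :: t)
      pvLoopA f r (name ++ '{' :: braces ++ ['}']) names
    else if c = ' ' then pvLoopA f t [] (names ++ [name])
    else pvLoopA f t (name ++ [c]) names

def split_names_on_space (author : String) : List String :=
  (pvLoopA (author.toList.length + 1) author.toList [] []).map String.ofList

-- ===== PORT B =====
-- B is one flat loop over the string with a depth counter; fuel = one unit per character
-- (never exhausted).  Escapes and splitting happen only at depth 0; '}' at depth 0 stays ordinary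
-- ('if depth:' in Source B; Nat subtraction gives the same here).
def pvLoopB : Nat → List Char → Nat → List Char → List (List Char) → List (List Char)
  | 0, _, _, name, names => names ++ [name]
  | _ + 1, [], _, name, names => names ++ [name]
  | f + 1, c :: t, depth, name, names =>
    if depth = 0 ∧ c = '\\' then
      match t with
      | [] => names ++ [name]                -- Python: IndexError on author[i+1] (excluded by Pre_)
      | d :: t' => pvLoopB f t' 0 (name ++ ['\\', d]) names
    else if c = '{' then pvLoopB f t (depth + 1) (name ++ [c]) names
    else if c = '}' then pvLoopB f t (depth - 1) (name ++ [c]) names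
    else if c = ' ' ∧ depth = 0 then pvLoopB f t 0 [] (names ++ [name])
    else pvLoopB f t depth (name ++ [c]) names

def split_names_on_space_alt (author : String) : List String :=
  (pvLoopB (author.toList.length + 1) author.toList 0 [] []).map String.ofList

-- ===== PRECONDITION & SPEC =====
-- one-pass well-formedness scan: state = (brace depth, escape pending at top level); the input is
-- well formed iff the final state is (0, false): every top-level backslash is followed by a
-- character and every brace group closes before the end of the string
def pvStep (acc : Nat × Bool) (c : Char) : Nat × Bool :=
  match acc with
  | (d, true) => (d, false)
  | (d, false) =>
    if d == 0 && c == '\\' then (0, true)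
    else if c == '{' then (d + 1, false)
    else if c == '}' then (d - 1, false)
    else (d, false)

def pvOkF (l : List Char) : Bool := l.foldl pvStep (0, false) == ((0 : Nat), false)

-- Pre_ excludes exactly the inputs on which A raises IndexError (unclosed '{' or trailing top-level '\')
def Pre_split_names_on_space (author : String) : Prop := pvOkF author.toList = true
instance (author : String) : Decidable (Pre_split_names_on_space author) := by unfold Pre_split_names_on_space; infer_instance

def pvWitness_split_names_on_space : String := "Jan {van der} Berg\\, Jr"

def Spec_split_names_on_space (author : String) (out : List String) : Prop := out = split_names_on_space_alt author
instance (author : String) (out : List String) : Decidable (Spec_split_names_on_space author out) := by unfold Spec_split_names_on_space; infer_instance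

-- ===== CLAIM (what is proved, stated in full; the proofs are below) =====
def Claim_equal_split_names_on_space : Prop := ∀ (author : String), Dom_split_names_on_space author → Pre_split_names_on_space author → Spec_split_names_on_space author (split_names_on_space author)

-- ===== LEMMAS AND PROOFS =====

-- recursive form of the well-formedness scan, convenient for the induction below
def pvOk : List Char → Nat → Bool
  | [], d => d == 0
  | c :: t, d =>
    if d = 0 ∧ c = '\\' then
      match t with
      | [] => false
      | _ :: t' => pvOk t' 0
    else pvOk t (if c = '{' then d + 1 else if c = '}' then d - 1 else d)

theorem pvOkF_eq_aux : ∀ (n : Nat) (l : List Char), l.length ≤ n → ∀ (d : Nat),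
    (l.foldl pvStep (d, false) == ((0 : Nat), false)) = pvOk l d := by
  intro n
  induction n with
  | zero =>
    intro l hl d
    have : l = [] := List.eq_nil_of_length_eq_zero (Nat.le_zero.mp hl)
    subst this
    simp [pvOk]
  | succ m ih =>
    intro l hl d
    match l with
    | [] => simp [pvOk]
    | c :: t =>
      by_cases h : d = 0 ∧ c = '\\'
      · obtain ⟨rfl, rfl⟩ := h
        match t with
        | [] => rw [pvOk.eq_def]; simp [pvStep]
        | e :: t' =>
          have h1 : pvStep (pvStep (0, false) '\\') e = (0, false) := by simp [pvStep]
          rw [pvOk.eq_def]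
          dsimp only
          rw [if_pos (⟨rfl, rfl⟩ : (0 : Nat) = 0 ∧ '\\' = '\\')]
          simp only [List.foldl_cons, h1]
          exact ih t' (by simp at hl; omega) 0
      · rw [pvOk.eq_def]
        simp only [if_neg h]
        have hb : (d == 0 && c == '\\') = false := by
          rcases not_and_or.mp h with h1 | h1 <;> simp [h1] <;> by_cases h2 : d = 0 <;> simp_all
        have h2 : pvStep (d, false) c = ((if c = '{' then d + 1 else if c = '}' then d - 1 else d), false) := by
          simp only [pvStep, hb, Bool.false_eq_true, if_false]
          by_cases h3 : c = '{' <;> by_cases h4 : c = '}' <;> simp_all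
        simp only [List.foldl_cons, h2]
        exact ih t (by simp at hl; omega) _

theorem pvOkF_eq (l : List Char) : pvOkF l = pvOk l 0 := by
  unfold pvOkF
  exact pvOkF_eq_aux l.length l le_rfl 0

-- reference scanner for one brace group at depth d: content (closing brace excluded) and the rest
def pvMc : List Char → Nat → Option (List Char × List Char)
  | [], _ => none
  | c :: t, d =>
    let d' := if c = '{' then d + 1 else if c = '}' then d - 1 else d
    if d' = 0 then some ([], t)
    else match pvMc t d' with
         | none => none
         | some (b, r) => some (c :: b, r)

theorem pvMc_length {l : List Char} {d : Nat} {b r : List Char}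
    (h : pvMc l d = some (b, r)) : r.length < l.length := by
  induction l generalizing d b r with
  | nil => simp [pvMc] at h
  | cons c t ih =>
    simp only [pvMc] at h
    by_cases h0 : (if c = '{' then d + 1 else if c = '}' then d - 1 else d) = 0
    · simp only [h0, if_pos rfl, reduceIte, Option.some.injEq, Prod.mk.injEq] at h
      obtain ⟨-, rfl⟩ := h
      simp
    · rw [if_neg h0] at h
      cases hm : pvMc t (if c = '{' then d + 1 else if c = '}' then d - 1 else d) with
      | none => rw [hm] at h; cases h
      | some p =>
        obtain ⟨b', r'⟩ := p
        rw [hm] at h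
        simp only [Option.some.injEq, Prod.mk.injEq] at h
        obtain ⟨-, rfl⟩ := h
        exact Nat.lt_succ_of_lt (ih hm)

theorem pvOk_cons (c : Char) (t : List Char) (d : Nat) (h : ¬ (d = 0 ∧ c = '\\')) :
    pvOk (c :: t) d = pvOk t (if c = '{' then d + 1 else if c = '}' then d - 1 else d) := by
  rw [pvOk.eq_def]; simp only [if_neg h]

theorem pvOk_succ (l : List Char) (d : Nat) :
    pvOk l (d + 1) = (match pvMc l (d + 1) with
                      | none => false
                      | some (_, r) => pvOk r 0) := by
  induction l generalizing d with
  | nil => simp [pvOk, pvMc]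
  | cons c t ih =>
    rw [pvOk_cons c t _ (by rintro ⟨h, -⟩; omega)]
    by_cases h0 : (if c = '{' then d + 1 + 1 else if c = '}' then d + 1 - 1 else d + 1) = 0
    · have hc : c = '}' ∧ d = 0 := by
        by_cases hb : c = '{' <;> by_cases he : c = '}' <;> simp [hb, he] at h0 ⊢ <;> omega
      obtain ⟨rfl, rfl⟩ := hc
      simp [pvMc]
    · obtain ⟨e, he⟩ : ∃ e, (if c = '{' then d + 1 + 1 else if c = '}' then d + 1 - 1 else d + 1) = e + 1 := by
        rcases Nat.exists_eq_succ_of_ne_zero h0 with ⟨e, he⟩; exact ⟨e, he⟩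
      rw [he, ih e]
      simp only [pvMc, he, if_neg (by omega : ¬ e + 1 = 0)]
      cases pvMc t (e + 1) with
      | none => rfl
      | some p => rfl

theorem pvMc_shift (l : List Char) (a d : Nat) :
    pvMc l (a + d + 2) = (match pvMc l (a + 1) with
                          | none => none
                          | some (b, r) => (pvMc r (d + 1)).map fun p => (b ++ '}' :: p.1, p.2)) := by
  induction l generalizing a with
  | nil => simp [pvMc]
  | cons c t ih =>
    by_cases h0 : (if c = '{' then a + 1 + 1 else if c = '}' then a + 1 - 1 else a + 1) = 0
    · -- the depth-(a+1) scan closes here: c = '}' and a = 0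
      have hc : c = '}' ∧ a = 0 := by
        by_cases hb : c = '{' <;> by_cases he : c = '}' <;> simp [hb, he] at h0 ⊢ <;> omega
      obtain ⟨rfl, rfl⟩ := hc
      simp only [pvMc]
      simp
      cases pvMc t (d + 1) with
      | none => rfl
      | some p => simp
    · obtain ⟨e, he⟩ : ∃ e, (if c = '{' then a + 1 + 1 else if c = '}' then a + 1 - 1 else a + 1) = e + 1 := by
        rcases Nat.exists_eq_succ_of_ne_zero h0 with ⟨e, he⟩; exact ⟨e, he⟩
      have hshift : (if c = '{' then a + d + 2 + 1 else if c = '}' then a + d + 2 - 1 else a + d + 2) = e + d + 2 := by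
        by_cases hb : c = '{' <;> by_cases hq : c = '}' <;> simp [hb, hq] at he ⊢ <;> omega
      simp only [pvMc, hshift, he]
      rw [if_neg (by omega : ¬ e + d + 2 = 0), if_neg (by omega : ¬ e + 1 = 0), ih e]
      cases pvMc t (e + 1) with
      | none => rfl
      | some p =>
        obtain ⟨b, r⟩ := p
        cases hq : pvMc r (d + 1) <;> simp [hq]

theorem pvSkipALoop_eq : ∀ (f : Nat) (l : List Char) {b r : List Char}, l.length ≤ f →
    pvMc l 1 = some (b, r) → ∀ cont, pvSkipALoop f l cont = (r, cont ++ b) := by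
  intro f
  induction f with
  | zero =>
    intro l b r hf h cont
    have hl : l = [] := List.eq_nil_of_length_eq_zero (Nat.le_zero.mp hf)
    subst hl
    simp [pvMc] at h
  | succ g ih =>
    intro l b r hf h cont
    match l with
    | [] => simp [pvMc] at h
    | c :: t =>
      by_cases hq : c = '}'
      · subst hq
        simp [pvMc] at h
        obtain ⟨rfl, rfl⟩ := h
        simp [pvSkipALoop]
      · by_cases hb : c = '{'
        · subst hb
          simp only [pvMc, if_neg (by decide : ¬ ('{':Char) = '}'), reduceIte] at h
          rw [show (1+1 : Nat) = 0 + 0 + 2 from rfl, pvMc_shift t 0 0] at h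
          cases h1 : pvMc t 1 with
          | none => rw [h1] at h; simp at h
          | some p =>
            obtain ⟨b1, r1⟩ := p
            rw [h1] at h
            simp only [Nat.zero_add] at h
            cases h2 : pvMc r1 1 with
            | none => rw [h2] at h; simp at h
            | some q =>
              obtain ⟨b2, r2⟩ := q
              rw [h2] at h
              simp at h
              obtain ⟨rfl, rfl⟩ := h
              have ht : t.length ≤ g := by simpa using hf
              have hr1 : r1.length ≤ g := le_trans (le_of_lt (pvMc_length h1)) ht
              rw [pvSkipALoop]
              simp only [reduceIte]
              rw [ih t ht h1 [], ih r1 hr1 h2 (cont ++ '{' :: ([] ++ b1) ++ ['}'])]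
              simp
        · rw [pvMc.eq_def] at h
          simp only [if_neg hb, if_neg hq] at h
          rw [if_neg (by omega : ¬ (1:Nat) = 0)] at h
          cases h1 : pvMc t 1 with
          | none => rw [h1] at h; cases h
          | some p =>
            obtain ⟨b1, r1⟩ := p
            rw [h1] at h
            simp only [Option.some.injEq, Prod.mk.injEq] at h
            obtain ⟨rfl, rfl⟩ := h
            rw [pvSkipALoop]
            simp only [if_neg hq, if_neg hb]
            rw [ih t (by simpa using hf) h1 (cont ++ [c])]
            simp

-- B's fuel is irrelevant once it covers the remaining length
theorem pvLoopB_fuel : ∀ (f f' : Nat) (l : List Char) (d : Nat) (name names),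
    l.length ≤ f → l.length ≤ f' → pvLoopB f l d name names = pvLoopB f' l d name names := by
  intro f
  induction f with
  | zero =>
    intro f' l d name names hf _
    have : l = [] := List.eq_nil_of_length_eq_zero (Nat.le_zero.mp hf)
    subst this
    cases f' <;> rfl
  | succ g ih =>
    intro f' l d name names hf hf'
    match l with
    | [] => cases f' <;> rfl
    | c :: t =>
      obtain ⟨g', rfl⟩ : ∃ g', f' = g' + 1 := by
        cases f' with
        | zero => simp at hf'
        | succ k => exact ⟨k, rfl⟩
      have ht : t.length ≤ g := by simpa using hf
      have ht' : t.length ≤ g' := by simpa using hf'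
      simp only [pvLoopB]
      by_cases h1 : d = 0 ∧ c = '\\'
      · rw [if_pos h1, if_pos h1]
        match t with
        | [] => rfl
        | e :: t' =>
          exact ih g' t' 0 _ _ (by simp at ht; omega) (by simp at ht'; omega)
      · rw [if_neg h1, if_neg h1]
        by_cases h2 : c = '{'
        · simp only [h2, reduceIte]; exact ih g' t _ _ _ ht ht'
        · by_cases h3 : c = '}'
          · simp only [h2, h3, reduceIte]; exact ih g' t _ _ _ ht ht'
          · by_cases h4 : c = ' ' ∧ d = 0
            · simp only [h2, h3, reduceIte, if_pos h4]; exact ih g' t _ _ _ ht ht'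
            · simp only [h2, h3, reduceIte, if_neg h4]; exact ih g' t _ _ _ ht ht'

-- B at depth d+1 copies one brace group verbatim (closing brace included) and returns to depth 0
theorem pvLoopB_skip : ∀ (l : List Char) {d : Nat} {b r : List Char},
    pvMc l (d + 1) = some (b, r) → ∀ name names,
    pvLoopB l.length l (d + 1) name names = pvLoopB r.length r 0 (name ++ b ++ ['}']) names := by
  intro l
  induction l with
  | nil => intro d b r h; simp [pvMc] at h
  | cons c t ih =>
    intro d b r h name names
    simp only [pvMc] at h
    have hne : ¬ (d + 1 = 0 ∧ c = '\\') := by rintro ⟨h1, -⟩; omega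
    by_cases h0 : (if c = '{' then d + 1 + 1 else if c = '}' then d + 1 - 1 else d + 1) = 0
    · have hc : c = '}' ∧ d = 0 := by
        by_cases hb : c = '{' <;> by_cases hq : c = '}' <;> simp [hb, hq] at h0 ⊢ <;> omega
      obtain ⟨rfl, rfl⟩ := hc
      simp at h
      obtain ⟨rfl, rfl⟩ := h
      simp [pvLoopB]
    · rw [if_neg h0] at h
      cases h1 : pvMc t (if c = '{' then d + 1 + 1 else if c = '}' then d + 1 - 1 else d + 1) with
      | none => rw [h1] at h; cases h
      | some p =>
        obtain ⟨b1, r1⟩ := p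
        rw [h1] at h
        simp only [Option.some.injEq, Prod.mk.injEq] at h
        obtain ⟨rfl, rfl⟩ := h
        show pvLoopB (t.length + 1) (c :: t) (d + 1) name names = _
        simp only [pvLoopB, if_neg hne]
        by_cases hb : c = '{'
        · subst hb
          simp only [reduceIte]
          simp only [reduceIte] at h1
          have := ih (d := d + 1) h1 (name ++ ['{']) names
          simpa using this
        · by_cases hq : c = '}'
          · subst hq
            simp only [reduceIte]
            simp only [if_neg (by decide : ¬ ('}':Char) = '{'), reduceIte] at h1
            have hd1 : d + 1 - 1 = d := by omega
            rw [hd1] at h1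
            obtain ⟨e, rfl⟩ : ∃ e, d = e + 1 := by
              cases d with
              | zero => simp at h0
              | succ k => exact ⟨k, rfl⟩
            have := ih (d := e) h1 (name ++ ['}']) names
            simpa using this
          · simp only [if_neg hb, if_neg hq]
            rw [if_neg (by rintro ⟨hsp, h1'⟩; omega)]
            simp only [if_neg hb, if_neg hq] at h1
            have := ih (d := d) h1 (name ++ [c]) names
            simpa using this

-- main induction: A's loop (recursive brace helper) = B's flat loop at depth 0
theorem pvLoop_eq : ∀ (f : Nat) (l name names), l.length ≤ f → pvOk l 0 = true →
    pvLoopA f l name names = pvLoopB f l 0 name names := by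
  intro f
  induction f with
  | zero => intro l name names _ _; rfl
  | succ g ih =>
    intro l name names hf hok
    match l with
    | [] => rfl
    | c :: t =>
      by_cases hs : c = '\\'
      · subst hs
        simp only [pvLoopA, pvLoopB, reduceIte, and_true]
        match t with
        | [] => simp [pvOk] at hok
        | d :: t' =>
          have hok' : pvOk t' 0 = true := by simpa [pvOk] using hok
          exact ih t' _ _ (by simp at hf; omega) hok'
      · have hok2 : pvOk t (if c = '{' then 1 else 0) = true := by
          rw [pvOk_cons c t 0 (by tauto)] at hok
          by_cases hb : c = '{' <;> by_cases hq : c = '}' <;> simp_all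
        have ht : t.length ≤ g := by simpa using hf
        by_cases hb : c = '{'
        · subst hb
          have hok3 : pvOk t 1 = true := by simpa using hok2
          rw [show (1:Nat) = 0 + 1 from rfl, pvOk_succ] at hok3
          cases h1 : pvMc t (0 + 1) with
          | none => rw [h1] at hok3; simp at hok3
          | some p =>
            obtain ⟨b, r⟩ := p
            rw [h1] at hok3
            simp only [] at hok3
            have h1' : pvMc t 1 = some (b, r) := by simpa using h1
            have hr : r.length ≤ g := le_trans (le_of_lt (pvMc_length h1')) ht
            have hB : pvLoopB (g + 1) ('{' :: t) 0 name names
                = pvLoopB g t 1 (name ++ ['{']) names := by simp [pvLoopB]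
            simp only [pvLoopA, if_neg hs, reduceIte, hB]
            rw [show pvSkipBracesA ('{' :: t) = pvSkipALoop (t.length + 1) t [] from rfl,
                pvSkipALoop_eq (t.length + 1) t (Nat.le_succ _) h1' []]
            simp only []
            rw [pvLoopB_fuel g t.length t 1 (name ++ ['{']) names ht le_rfl,
                pvLoopB_skip t (d := 0) h1' (name ++ ['{']) names,
                pvLoopB_fuel r.length g r 0 _ names le_rfl hr]
            have hnm : name ++ '{' :: ([] ++ b) ++ ['}'] = name ++ ['{'] ++ b ++ ['}'] := by simp
            rw [hnm]
            exact ih r _ names hr hok3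
        · have hok0 : pvOk t 0 = true := by simpa [hb] using hok2
          by_cases hsp : c = ' '
          · subst hsp
            have hB : pvLoopB (g + 1) (' ' :: t) 0 name names
                = pvLoopB g t 0 [] (names ++ [name]) := by simp [pvLoopB]
            simp only [pvLoopA, if_neg hs, if_neg hb, reduceIte, hB]
            exact ih t _ _ ht hok0
          · by_cases hq : c = '}'
            · subst hq
              have hB : pvLoopB (g + 1) ('}' :: t) 0 name names
                  = pvLoopB g t 0 (name ++ ['}']) names := by simp [pvLoopB]
              simp only [pvLoopA, if_neg hs, if_neg hb, if_neg hsp, reduceIte, hB]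
              exact ih t _ _ ht hok0
            · have hB : pvLoopB (g + 1) (c :: t) 0 name names
                  = pvLoopB g t 0 (name ++ [c]) names := by
                simp only [pvLoopB]
                rw [if_neg (by rintro ⟨-, h⟩; exact hs h), if_neg hb, if_neg hq,
                    if_neg (by rintro ⟨h, -⟩; exact hsp h)]
              simp only [pvLoopA, if_neg hs, if_neg hb, if_neg hsp, if_neg hq, hB]
              exact ih t _ _ ht hok0

-- ===== VERDICT (by name: the statement is the Claim_ definition above) =====
theorem split_names_on_space_spec : Claim_equal_split_names_on_space := by
  intro author _ hpre
  unfold Pre_split_names_on_space at hpre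
  rw [pvOkF_eq] at hpre
  unfold Spec_split_names_on_space split_names_on_space split_names_on_space_alt
  rw [pvLoop_eq _ _ _ _ (Nat.le_succ _) hpre]
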